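-- pv_equiv track=rewrite | github.com/RedStarWithGit/my-leetcode | problems/common/_02500_02600/02576.py | maxNumOfMarkedIndices
-- ===== SOURCE A (Python) =====
-- import bisect
-- from typing import List
--
-- def maxNumOfMarkedIndices(nums: List[int]) -> int:
--     nums.sort()
--     n = len(nums)
--
--     def check(k):
--         for i in range(k):
--             # nums[k-1] vs. nums[n-1]
--             # nums[0] vs. nums[n-k]
--             if 2 * nums[i] > nums[n - k + i]:
--                 return True
--         return False
--
--     return (bisect.bisect_left(range(n // 2 + 1), True, key=check) - 1) * 2
-- ===== SOURCE B (Python) =====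
-- def maxNumOfMarkedIndices(nums):
--     # Greedy two-pointer instead of binary-search-on-answer; sorts nums in place like A.
--     nums.sort()
--     n = len(nums)
--     i = 0
--     for j in range((n + 1) // 2, n):
--         if 2 * nums[i] <= nums[j]:
--             i += 1
--     return 2 * i
-- ===== Notes on version B (the rewrite author's own statement) =====
-- stated objective: faster
-- what changed: Replaced the binary search on the answer (each probe re-scanning up to n/2 pairs) by a single greedy two-pointer sweep over the sorted array's upper half.
import Mathlib
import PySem

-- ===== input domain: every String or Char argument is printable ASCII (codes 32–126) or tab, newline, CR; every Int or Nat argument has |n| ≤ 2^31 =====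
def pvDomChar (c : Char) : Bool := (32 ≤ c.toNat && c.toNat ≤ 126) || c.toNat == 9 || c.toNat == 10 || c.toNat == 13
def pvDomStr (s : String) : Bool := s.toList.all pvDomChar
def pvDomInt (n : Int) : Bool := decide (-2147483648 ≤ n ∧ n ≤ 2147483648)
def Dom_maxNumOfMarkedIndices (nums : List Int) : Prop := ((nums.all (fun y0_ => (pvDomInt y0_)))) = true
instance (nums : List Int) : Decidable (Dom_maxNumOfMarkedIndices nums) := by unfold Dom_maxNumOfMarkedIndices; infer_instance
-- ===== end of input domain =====

-- B replaces A's binary search on the answer by one greedy two-pointer sweep (fewer passes).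
-- Both A and B sort `nums` in place in Python; the theorems below are about the return value.

-- ===== PORT A =====
-- inner helper `check(k)`: the `for i in range(k)` loop, consuming the remaining range list
def pvCheckLoop (s : List Int) (n k : Int) : List Int → Bool
  | [] => false
  | i :: rest =>
      if 2 * PySem.List.pyGetD s i 0 > PySem.List.pyGetD s (n - k + i) 0 then true
      else pvCheckLoop s n k rest

-- hand port of `bisect.bisect_left(range(n//2+1), True, key=check)` (PySem's bisectLeft has no
-- key parameter): exact step-for-step binary search, fueled like PySem's own bisectLeftLoop
-- (the fuel only guarantees totality; it is never exhausted, see pvBisectLoop_eq below);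
-- `key(mid) < True` ⟺ `check mid = false`.
def pvBisectLoop (check : Int → Bool) : Nat → Int → Int → Int
  | 0, lo, _ => lo
  | fuel + 1, lo, hi =>
    if lo < hi then
      let mid := PySem.Int.floordiv (lo + hi) 2
      if check mid then pvBisectLoop check fuel lo mid
      else pvBisectLoop check fuel (mid + 1) hi
    else lo

def pvBisect (check : Int → Bool) (lo hi : Int) : Int :=
  pvBisectLoop check (hi - lo).toNat lo hi

def maxNumOfMarkedIndices (nums : List Int) : Int :=
  let s := PySem.List.sorted nums (fun x => x) false
  let n : Int := PySem.List.len s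
  (pvBisect (fun k => pvCheckLoop s n k (PySem.List.pyRange 0 k 1)) 0
      (PySem.Int.floordiv n 2 + 1) - 1) * 2

-- ===== PORT B =====
def maxNumOfMarkedIndices_alt (nums : List Int) : Int :=
  let s := PySem.List.sorted nums (fun x => x) false
  let n : Int := PySem.List.len s
  let i := (PySem.List.pyRange (PySem.Int.floordiv (n + 1) 2) n 1).foldl
      (fun i j => if 2 * PySem.List.pyGetD s i 0 ≤ PySem.List.pyGetD s j 0 then i + 1 else i) 0
  2 * i

-- ===== PRECONDITION & SPEC =====
def Spec_maxNumOfMarkedIndices (nums : List Int) (out : Int) : Prop := out = maxNumOfMarkedIndices_alt nums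
instance (nums : List Int) (out : Int) : Decidable (Spec_maxNumOfMarkedIndices nums out) := by unfold Spec_maxNumOfMarkedIndices; infer_instance

-- ===== CLAIM (what is proved, stated in full; the proofs are below) =====
def Claim_equal_maxNumOfMarkedIndices : Prop := ∀ (nums : List Int), Dom_maxNumOfMarkedIndices nums → Spec_maxNumOfMarkedIndices nums (maxNumOfMarkedIndices nums)

-- ===== LEMMAS AND PROOFS =====

-- proof-side Nat model of the feasibility predicate: "the k smallest can be marked with the k largest"
def okN (s : List Int) (k : Nat) : Prop :=
  ∀ t, t < k → 2 * s.getD t 0 ≤ s.getD (s.length - k + t) 0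

-- proof-side Nat model of B's greedy sweep
def pvG (s : List Int) (j i : Nat) : Nat :=
  if j < s.length then
    if 2 * s.getD i 0 ≤ s.getD j 0 then pvG s (j + 1) (i + 1) else pvG s (j + 1) i
  else i
termination_by s.length - j
decreasing_by all_goals omega

lemma sortedD {s : List Int} (hs : s.Pairwise (· ≤ ·)) {a b : Nat}
    (hab : a ≤ b) (hb : b < s.length) : s.getD a 0 ≤ s.getD b 0 := by
  rcases Nat.lt_or_ge a s.length with ha | ha
  · rcases eq_or_lt_of_le hab with rfl | hlt
    · exact le_refl _
    · rw [List.getD_eq_getElem _ _ ha, List.getD_eq_getElem _ _ hb]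
      exact List.pairwise_iff_getElem.mp hs a b ha hb hlt
  · omega


lemma pvG_bounds (s : List Int) (j i : Nat) :
    i ≤ pvG s j i ∧ pvG s j i ≤ i + (s.length - j) := by
  unfold pvG
  split
  · split
    · have := pvG_bounds s (j + 1) (i + 1); omega
    · have := pvG_bounds s (j + 1) i; omega
  · omega
termination_by s.length - j
decreasing_by all_goals omega


lemma pvG_step (s : List Int) (j i : Nat) (h : j < s.length) :
    pvG s j i = pvG s (j + 1) (if 2 * s.getD i 0 ≤ s.getD j 0 then i + 1 else i) := by
  conv_lhs => rw [pvG]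
  rw [if_pos h]
  split <;> rfl

-- feasibility of the greedy count
lemma pvG_ok {s : List Int} (hs : s.Pairwise (· ≤ ·)) (j i : Nat) (hij : i ≤ j)
    (t : Nat) (hit : i ≤ t) (htr : t < pvG s j i) :
    2 * s.getD t 0 ≤ s.getD (s.length - pvG s j i + t) 0 := by
  by_cases hj : j < s.length
  · rw [pvG_step s j i hj] at htr ⊢
    by_cases hc : 2 * s.getD i 0 ≤ s.getD j 0
    · rw [if_pos hc] at htr ⊢
      rcases Nat.eq_or_lt_of_le hit with rfl | hlt
      · have hb := pvG_bounds s (j + 1) (i + 1)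
        have hr1 : pvG s (j + 1) (i + 1) ≤ s.length := by omega
        have hjle : j ≤ s.length - pvG s (j + 1) (i + 1) + i := by omega
        have := sortedD hs hjle (by omega)
        omega
      · exact pvG_ok hs (j + 1) (i + 1) (by omega) t (by omega) htr
    · rw [if_neg hc] at htr ⊢
      exact pvG_ok hs (j + 1) i (by omega) t hit htr
  · rw [pvG, if_neg hj] at htr
    omega
termination_by s.length - j
decreasing_by all_goals omega

-- maximality of the greedy count
lemma pvG_ge {s : List Int} (hs : s.Pairwise (· ≤ ·)) (K : Nat)
    (hok : okN s K) (hK : K ≤ s.length - (s.length + 1) / 2)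
    (t i : Nat) (htK : t ≤ K) (hti : t ≤ i) : K ≤ pvG s (s.length - K + t) i := by
  rcases Nat.eq_or_lt_of_le htK with rfl | hlt
  · have hj : s.length - t + t = s.length := by omega
    rw [hj, pvG, if_neg (by omega)]
    omega
  · have hj : s.length - K + t < s.length := by omega
    rw [pvG_step s _ i hj]
    by_cases hc : 2 * s.getD i 0 ≤ s.getD (s.length - K + t) 0
    · rw [if_pos hc]
      have : s.length - K + t + 1 = s.length - K + (t + 1) := by omega
      rw [this]
      exact pvG_ge hs K hok hK (t + 1) (i + 1) (by omega) (by omega)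
    · rw [if_neg hc]
      have hti' : t + 1 ≤ i := by
        rcases Nat.eq_or_lt_of_le hti with rfl | h
        · exact absurd (hok t hlt) hc
        · omega
      have : s.length - K + t + 1 = s.length - K + (t + 1) := by omega
      rw [this]
      exact pvG_ge hs K hok hK (t + 1) i (by omega) hti'
termination_by K - t
decreasing_by all_goals omega

lemma pvG_unroll (s : List Int) : ∀ j' j i, j ≤ j' → j' ≤ s.length →
    ∃ i', i ≤ i' ∧ pvG s j i = pvG s j' i' := by
  intro j'
  induction j' with
  | zero =>
    intro j i hj _
    have : j = 0 := by omega
    subst this; exact ⟨i, le_refl _, rfl⟩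
  | succ m ih =>
    intro j i hj hm
    rcases Nat.eq_or_lt_of_le hj with rfl | hlt
    · exact ⟨i, le_refl _, rfl⟩
    · obtain ⟨i', hi', heq⟩ := ih j i (by omega) (by omega)
      rw [heq, pvG_step s m i' (by omega)]
      split
      · exact ⟨i' + 1, by omega, rfl⟩
      · exact ⟨i', hi', rfl⟩


lemma okN_mono {s : List Int} (hs : s.Pairwise (· ≤ ·)) {k : Nat}
    (hk : k + 1 ≤ s.length) (h : okN s (k + 1)) : okN s k := by
  intro t ht
  have h1 := h t (by omega)
  have h2 : s.getD (s.length - (k + 1) + t) 0 ≤ s.getD (s.length - k + t) 0 :=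
    sortedD hs (by omega) (by omega)
  omega


lemma checkLoop_false_iff (s : List Int) (k : Nat) (hk : k ≤ s.length) (a : Nat) :
    (pvCheckLoop s (s.length : Int) (k : Int) (PySem.List.pyRange (a : Int) (k : Int) 1) = false
      ↔ ∀ t, a ≤ t → t < k → 2 * s.getD t 0 ≤ s.getD (s.length - k + t) 0) := by
  by_cases hak : a < k
  · rw [PySem.List.pyRange_one_cons (by exact_mod_cast hak)]
    rw [pvCheckLoop]
    have e1 : PySem.List.pyGetD s (a : Int) 0 = s.getD a 0 :=
      PySem.List.pyGetD_natCast s a 0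
    have e2 : (s.length : Int) - (k : Int) + (a : Int) = ((s.length - k + a : Nat) : Int) := by
      omega
    have e3 : PySem.List.pyGetD s ((s.length : Int) - (k : Int) + (a : Int)) 0
        = s.getD (s.length - k + a) 0 := by
      rw [e2]; exact PySem.List.pyGetD_natCast s _ 0
    rw [e1, e3]
    by_cases hc : 2 * s.getD a 0 > s.getD (s.length - k + a) 0
    · rw [if_pos hc]
      constructor
      · intro h; cases h
      · intro h; exact absurd (h a (le_refl a) hak) (by omega)
    · rw [if_neg hc]
      have e4 : (a : Int) + 1 = ((a + 1 : Nat) : Int) := by omega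
      rw [e4, checkLoop_false_iff s k hk (a + 1)]
      constructor
      · intro h t hat htk
        rcases Nat.eq_or_lt_of_le hat with rfl | h'
        · omega
        · exact h t h' htk
      · intro h t hat htk
        exact h t (by omega) htk
  · rw [PySem.List.pyRange_one_eq_nil (by exact_mod_cast (by omega : k ≤ a))]
    rw [pvCheckLoop]
    constructor
    · intro _ t hat htk; omega
    · intro _; rfl
termination_by k - a
decreasing_by omega

lemma pvBisectLoop_eq (check : Int → Bool) (F : Int) (fuel : Nat) (lo hi : Int)
    (hfuel : (hi - lo).toNat ≤ fuel)
    (h1 : lo ≤ F + 1) (h2 : F + 1 ≤ hi)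
    (hf : ∀ k, lo ≤ k → k ≤ F → check k = false)
    (ht : ∀ k, F < k → k < hi → check k = true) :
    pvBisectLoop check fuel lo hi = F + 1 := by
  induction fuel generalizing lo hi with
  | zero =>
    rw [pvBisectLoop]
    omega
  | succ fuel ih =>
    rw [pvBisectLoop]
    by_cases h : lo < hi
    · rw [if_pos h]
      have hm := PySem.Int.floordiv_two_mid_bounds (le_of_lt h)
      have hmid : PySem.Int.floordiv (lo + hi) 2 = (lo + hi) / 2 :=
        PySem.Int.floordiv_eq_ediv_of_pos (by norm_num)
      have hlo : lo ≤ PySem.Int.floordiv (lo + hi) 2 := hm.1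
      have hhi : PySem.Int.floordiv (lo + hi) 2 < hi := by omega
      by_cases hc : check (PySem.Int.floordiv (lo + hi) 2) = true
      · rw [if_pos hc]
        have hFm : F < PySem.Int.floordiv (lo + hi) 2 := by
          by_contra hn
          push Not at hn
          rw [hf _ hlo hn] at hc
          cases hc
        exact ih lo _ (by omega) h1 (by omega) hf (fun k hk1 hk2 => ht k hk1 (by omega))
      · rw [if_neg hc]
        have hcf : check (PySem.Int.floordiv (lo + hi) 2) = false := by
          simpa using hc
        have hmF : PySem.Int.floordiv (lo + hi) 2 ≤ F := by
          by_contra hn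
          push Not at hn
          rw [ht _ hn hhi] at hcf
          cases hcf
        exact ih _ hi (by omega) (by omega) h2 (fun k hk1 hk2 => hf k (by omega) hk2) ht
    · rw [if_neg h]
      omega

lemma pvBisect_eq (check : Int → Bool) (F lo hi : Int) (h1 : lo ≤ F + 1) (h2 : F + 1 ≤ hi)
    (hf : ∀ k, lo ≤ k → k ≤ F → check k = false)
    (ht : ∀ k, F < k → k < hi → check k = true) :
    pvBisect check lo hi = F + 1 :=
  pvBisectLoop_eq check F (hi - lo).toNat lo hi (le_refl _) h1 h2 hf ht

lemma okN_down {s : List Int} (hs : s.Pairwise (· ≤ ·)) (k : Nat) :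
    ∀ m, k ≤ s.length → okN s k → m ≤ k → okN s m := by
  induction k with
  | zero => intro m _ h hm; rw [Nat.le_zero.mp hm]; exact h
  | succ p ih =>
    intro m hk h hm
    rcases Nat.eq_or_lt_of_le hm with rfl | hlt
    · exact h
    · exact ih m (by omega) (okN_mono hs hk h) (by omega)

-- B's fold over the upper half computes the Nat greedy model pvG
lemma foldB (s : List Int) (j i : Nat) :
    (PySem.List.pyRange (j : Int) (s.length : Int) 1).foldl
      (fun i j => if 2 * PySem.List.pyGetD s i 0 ≤ PySem.List.pyGetD s j 0 then i + 1 else i)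
      (i : Int)
    = ((pvG s j i : Nat) : Int) := by
  by_cases h : j < s.length
  · rw [PySem.List.pyRange_one_cons (by exact_mod_cast h), List.foldl_cons, pvG_step s j i h]
    have e1 : PySem.List.pyGetD s (i : Int) 0 = s.getD i 0 := PySem.List.pyGetD_natCast s i 0
    have e2 : PySem.List.pyGetD s (j : Int) 0 = s.getD j 0 := PySem.List.pyGetD_natCast s j 0
    rw [e1, e2]
    have e3 : ((j : Int) + 1) = ((j + 1 : Nat) : Int) := by omega
    by_cases hc : 2 * s.getD i 0 ≤ s.getD j 0
    · rw [if_pos hc, if_pos hc]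
      have e4 : ((i : Int) + 1) = ((i + 1 : Nat) : Int) := by omega
      rw [e3, e4, foldB s (j + 1) (i + 1)]
    · rw [if_neg hc, if_neg hc, e3, foldB s (j + 1) i]
  · rw [PySem.List.pyRange_one_eq_nil (by exact_mod_cast (by omega : s.length ≤ j)),
      List.foldl_nil, pvG, if_neg h]
termination_by s.length - j
decreasing_by all_goals omega

-- ===== VERDICT (by name: the statement is the Claim_ definition above) =====
theorem maxNumOfMarkedIndices_spec : Claim_equal_maxNumOfMarkedIndices := by
  intro nums _
  unfold Spec_maxNumOfMarkedIndices maxNumOfMarkedIndices maxNumOfMarkedIndices_alt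
  set s := PySem.List.sorted nums (fun x => x) false with hsdef
  have hs : s.Pairwise (· ≤ ·) := PySem.List.sorted_pairwise nums (fun x => x)
  set n := s.length with hndef
  have hlen : PySem.List.len s = (n : Int) := by simp [PySem.List.len_eq, ← hndef]
  have hc : (n : Nat) - (n + 1) / 2 = n / 2 := by omega
  have hfd1 : PySem.Int.floordiv ((n : Int) + 1) 2 = (((n + 1) / 2 : Nat) : Int) := by
    exact_mod_cast PySem.Int.floordiv_natCast (n + 1) 2
  have hfd2 : PySem.Int.floordiv (n : Int) 2 = ((n / 2 : Nat) : Int) := by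
    exact_mod_cast PySem.Int.floordiv_natCast n 2
  set c := (n + 1) / 2 with hcdef
  set g := pvG s c 0 with hgdef
  -- B's value is 2 * g
  have hB : (PySem.List.pyRange (PySem.Int.floordiv (PySem.List.len s + 1) 2) (PySem.List.len s) 1).foldl
      (fun i j => if 2 * PySem.List.pyGetD s i 0 ≤ PySem.List.pyGetD s j 0 then i + 1 else i) 0
      = ((g : Nat) : Int) := by
    rw [hlen, hfd1]
    exact_mod_cast foldB s c 0
  -- greedy facts
  have hgub : g ≤ n / 2 := by
    have := pvG_bounds s c 0
    omega
  have hok : okN s g := fun t ht => pvG_ok hs c 0 (by omega) t (by omega) ht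
  have hup : ∀ m, g < m → m ≤ n / 2 → ¬ okN s m := by
    intro m hgm hm hokm
    have hok1 : okN s (g + 1) := okN_down hs m (g + 1) (by omega) hokm (by omega)
    obtain ⟨i0, _, heq⟩ := pvG_unroll s (n - (g + 1)) c 0 (by omega) (by omega)
    have hge := pvG_ge hs (g + 1) hok1 (by omega) 0 i0 (by omega) (by omega)
    simp only [Nat.add_zero, ← hndef] at hge
    rw [← heq, ← hgdef] at hge
    omega
  -- behaviour of A's check
  have hchk : ∀ m : Nat, m ≤ n →
      ((pvCheckLoop s (PySem.List.len s) ((m : Nat) : Int)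
          (PySem.List.pyRange 0 ((m : Nat) : Int) 1) = false) ↔ okN s m) := by
    intro m hm
    rw [hlen]
    have h0 : ((0 : Nat) : Int) = (0 : Int) := by norm_num
    rw [← h0, checkLoop_false_iff s m hm 0]
    constructor
    · intro h t ht; exact h t (by omega) ht
    · intro h t _ ht; exact h t ht
  have hfalse : ∀ k : Int, 0 ≤ k → k ≤ ((g : Nat) : Int) →
      pvCheckLoop s (PySem.List.len s) k (PySem.List.pyRange 0 k 1) = false := by
    intro k hk0 hkg
    have hm : k = ((k.toNat : Nat) : Int) := by omega
    rw [hm]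
    exact (hchk k.toNat (by omega)).mpr (okN_down hs g k.toNat (by omega) hok (by omega))
  have htrue : ∀ k : Int, ((g : Nat) : Int) < k → k < ((n / 2 : Nat) : Int) + 1 →
      pvCheckLoop s (PySem.List.len s) k (PySem.List.pyRange 0 k 1) = true := by
    intro k hkg hkh
    have hm : k = ((k.toNat : Nat) : Int) := by omega
    rw [hm]
    cases hb : pvCheckLoop s (PySem.List.len s) ((k.toNat : Nat) : Int)
        (PySem.List.pyRange 0 ((k.toNat : Nat) : Int) 1) with
    | true => rfl
    | false =>
      exact absurd ((hchk k.toNat (by omega)).mp hb)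
        (hup k.toNat (by omega) (by omega))
  have hbis := pvBisect_eq
    (fun k => pvCheckLoop s (PySem.List.len s) k (PySem.List.pyRange 0 k 1))
    ((g : Nat) : Int) 0 (((n / 2 : Nat) : Int) + 1)
    (by omega) (by exact_mod_cast by omega) hfalse htrue
  simp only [hlen, hfd1] at hB
  simp only [hlen] at hbis
  simp only [hlen, hfd1, hfd2]
  rw [hbis, hB]
  ring
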